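-- pv_equiv track=rewrite | github.com/duckycodess/cs12labexercises | cs12232lab01/cs12232lab01a.py | safe_jumps
-- ===== SOURCE A (Python) =====
-- from typing import Iterator
--
-- def safe_jumps(heights: list[int]) -> list[int]:
--     ans: list[int] = [0] * len(heights)
--
--     def solve(elems: Iterator[tuple[int, int]]) -> None:
--         stk: list[tuple[int, int]] = []
--         for i, height in elems:
--             total = same = 0
--             while stk and stk[-1][0] <= height:
--                 curr, freq = stk.pop()
--                 if curr == height:
--                     same += freq
--                 total += freq
--             ans[i] += total
--             stk.append((height, same + 1))
--
--     solve(enumerate(heights))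
--     solve(reversed(list(enumerate(heights))))
--     return ans
-- ===== SOURCE B (Python) =====
-- def safe_jumps(heights: list[int]) -> list[int]:
--     def scan(seq, h):
--         # count buildings visible from height h scanning outward along seq:
--         # a building counts if it is not taller than h and no strictly taller
--         # building stands before it in the scan (equal heights pass through)
--         c = 0
--         runmax = None
--         for x in seq:
--             if x <= h and (runmax is None or runmax <= x):
--                 c += 1
--             if runmax is None or x > runmax:
--                 runmax = x
--         return c
--     return [scan(heights[:i][::-1], h) + scan(heights[i+1:], h)
--             for i, h in enumerate(heights)]
-- ===== Notes on version B (the rewrite author's own statement) =====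
-- stated objective: simpler
-- what changed: Replaces A's two monotonic-stack passes (with frequency merging of equal heights) by two direct outward scans per index that count buildings not taller than heights[i] with no strictly taller building in between.
import Mathlib
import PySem

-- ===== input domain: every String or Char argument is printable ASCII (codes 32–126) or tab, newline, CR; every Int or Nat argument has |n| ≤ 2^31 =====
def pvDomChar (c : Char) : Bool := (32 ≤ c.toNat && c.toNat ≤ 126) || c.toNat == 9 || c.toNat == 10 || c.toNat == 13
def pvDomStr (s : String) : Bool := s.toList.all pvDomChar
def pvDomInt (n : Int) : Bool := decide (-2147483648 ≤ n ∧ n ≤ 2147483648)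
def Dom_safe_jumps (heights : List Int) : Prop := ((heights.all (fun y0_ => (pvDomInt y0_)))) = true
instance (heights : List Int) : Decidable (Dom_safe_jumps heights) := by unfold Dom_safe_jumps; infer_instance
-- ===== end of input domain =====

-- B replaces A's two monotonic-stack passes by two direct outward scans per index (simpler, quadratic instead of amortized linear).

-- ===== PORT A =====
-- Python list used as a stack: ported with the TOP at the HEAD of the Lean list.
def popLoop (stk : List (Int × Int)) (height : Int) (total same : Int) :
    Int × Int × List (Int × Int) :=
  match stk with
  | [] => (total, same, [])
  | (curr, freq) :: rest =>
      if curr ≤ height then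
        popLoop rest height (total + freq) (if curr = height then same + freq else same)
      else (total, same, (curr, freq) :: rest)

-- enumerate(...) starting at n (indices are the valid positions, hence Nat)
def pyEnum (n : Nat) : List Int → List (Nat × Int)
  | [] => []
  | h :: t => (n, h) :: pyEnum (n + 1) t

-- the inner 'solve' of A: fold over the (i, height) pairs, threading ans and the stack
def solveLoop : List (Nat × Int) → List Int → List (Int × Int) → List Int
  | [], ans, _ => ans
  | (i, height) :: rest, ans, stk =>
      let r := popLoop stk height 0 0
      solveLoop rest (ans.set i (ans.getD i 0 + r.1)) ((height, r.2.1 + 1) :: r.2.2)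

def safe_jumps (heights : List Int) : List Int :=
  solveLoop ((pyEnum 0 heights).reverse)
    (solveLoop (pyEnum 0 heights) (List.replicate heights.length 0) []) []

-- ===== PORT B =====
def mOK (m : Option Int) (x : Int) : Bool :=
  match m with | none => true | some v => decide (v ≤ x)

def mUp (m : Option Int) (x : Int) : Option Int :=
  match m with | none => some x | some v => if x > v then some x else some v

-- one iteration of scan's for-loop: state (c, runmax)
def countStep (h : Int) (st : Int × Option Int) (x : Int) : Int × Option Int :=
  ((if x ≤ h ∧ mOK st.2 x = true then st.1 + 1 else st.1), mUp st.2 x)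

-- scan(seq, h) of Source B
def countPass (seq : List Int) (h : Int) : Int :=
  (seq.foldl (countStep h) (0, none)).1

-- heights[:i][::-1] / heights[i+1:] ported as take/drop/reverse (exact: i is a Nat index from enumerate)
def safe_jumps_alt (heights : List Int) : List Int :=
  (pyEnum 0 heights).map
    (fun p => countPass ((heights.take p.1).reverse) p.2 + countPass (heights.drop (p.1 + 1)) p.2)

-- ===== PRECONDITION & SPEC =====
def Spec_safe_jumps (heights : List Int) (out : List Int) : Prop := out = safe_jumps_alt heights
instance (heights : List Int) (out : List Int) : Decidable (Spec_safe_jumps heights out) := by unfold Spec_safe_jumps; infer_instance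

-- ===== CLAIM (what is proved, stated in full; the proofs are below) =====
def Claim_equal_safe_jumps : Prop := ∀ (heights : List Int), Dom_safe_jumps heights → Spec_safe_jumps heights (safe_jumps heights)

-- ===== LEMMAS AND PROOFS =====

-- total frequency of stack entries whose value satisfies p
def sumIf (p : Int → Bool) : List (Int × Int) → Int
  | [] => 0
  | (v, f) :: t => (if p v then f else 0) + sumIf p t

-- the stack A's solve has after pushing the elements of rp oldest-last (rp is newest-first)
def canon : List Int → List (Int × Int)
  | [] => []
  | x :: rp =>
      let r := popLoop (canon rp) x 0 0
      (x, r.2.1 + 1) :: r.2.2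

-- per-index counts of B, left pass (pre = reversed prefix) and right pass
def lefts : List Int → List Int → List Int
  | _, [] => []
  | pre, h :: t => countPass pre h :: lefts (h :: pre) t

def rights : List Int → List Int → List Int
  | [], _ => []
  | h :: t, suf => countPass (t ++ suf) h :: rights t suf

theorem sumIf_ext (p q : Int → Bool) (C : List (Int × Int)) (h : ∀ v, p v = q v) :
    sumIf p C = sumIf q C := by
  induction C with
  | nil => rfl
  | cons e t ih => simp [sumIf, h, ih]

theorem sumIf_filter (p q : Int → Bool) (C : List (Int × Int)) :
    sumIf p (C.filter (fun e => q e.1)) = sumIf (fun v => q v && p v) C := by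
  induction C with
  | nil => rfl
  | cons e t ih =>
      obtain ⟨v, f⟩ := e
      by_cases hq : q v <;> simp [sumIf, List.filter, hq, ih]

theorem sumIf_zero (p : Int → Bool) (C : List (Int × Int)) (h : ∀ e ∈ C, p e.1 = false) :
    sumIf p C = 0 := by
  induction C with
  | nil => rfl
  | cons e t ih =>
      simp [sumIf, h e (List.mem_cons_self ..), ih (fun e2 he2 => h e2 (List.mem_cons_of_mem _ he2))]

theorem popLoop_eq (stk : List (Int × Int))
    (hpw : List.Pairwise (fun a b => a.1 < b.1) stk) (x t s : Int) :
    popLoop stk x t s =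
      (t + sumIf (fun v => decide (v ≤ x)) stk,
       s + sumIf (fun v => decide (v = x)) stk,
       stk.filter (fun p => decide (x < p.1))) := by
  induction stk generalizing t s with
  | nil => simp [popLoop, sumIf]
  | cons e rest ih =>
      obtain ⟨v, f⟩ := e
      by_cases hle : v ≤ x
      · rw [popLoop]
        simp only [hle, if_true]
        rw [ih hpw.tail]
        have hx : ¬ x < v := by omega
        by_cases hvx : v = x
        · simp only [sumIf, hle, hvx, List.filter_cons, decide_true, decide_eq_true_eq,
            Prod.mk.injEq, if_pos, lt_irrefl, decide_false, Bool.false_eq_true,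
            not_false_eq_true, if_neg, le_refl]
          exact ⟨by ring, by ring, trivial⟩
        · simp only [sumIf, hle, hvx, List.filter_cons, decide_true, decide_eq_true_eq,
            Prod.mk.injEq, if_pos, hx, decide_false, Bool.false_eq_true,
            not_false_eq_true, if_neg, le_refl]
          exact ⟨by ring, by ring, trivial⟩
      · rw [popLoop]
        simp only [hle, if_false]
        have hall : ∀ e ∈ ((v,f) :: rest), x < e.1 := by
          intro p hp
          rcases List.mem_cons.1 hp with h | h
          · subst h; omega
          · have := (List.pairwise_cons.1 hpw).1 p h
            omega
        have h1 : sumIf (fun w => decide (w ≤ x)) ((v,f) :: rest) = 0 :=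
          sumIf_zero _ _ (by intro e he; have := hall e he; simp; omega)
        have h2 : sumIf (fun w => decide (w = x)) ((v,f) :: rest) = 0 :=
          sumIf_zero _ _ (by intro e he; have := hall e he; simp; omega)
        have h3 : ((v,f) :: rest).filter (fun p => decide (x < p.1)) = (v,f) :: rest :=
          List.filter_eq_self.2 (by intro e he; simpa using hall e he)
        rw [h1, h2, h3]; simp

theorem canon_pairwise (rp : List Int) :
    List.Pairwise (fun a b => a.1 < b.1) (canon rp) := by
  induction rp with
  | nil => exact List.Pairwise.nil
  | cons x rp ih =>
      rw [canon, popLoop_eq _ ih]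
      refine List.pairwise_cons.2 ⟨?_, ih.filter _⟩
      intro e he
      have := List.of_mem_filter he
      simpa using this

theorem canon_cons (x : Int) (rp : List Int) :
    canon (x :: rp) =
      (x, sumIf (fun v => decide (v = x)) (canon rp) + 1) ::
        (canon rp).filter (fun p => decide (x < p.1)) := by
  rw [canon, popLoop_eq _ (canon_pairwise rp)]
  simp

theorem mOK_mUp (m : Option Int) (x v : Int) :
    mOK (mUp m x) v = (decide (x ≤ v) && mOK m v) := by
  cases m with
  | none => simp [mOK, mUp]
  | some w =>
      by_cases h1 : x > w
      · show mOK (if x > w then some x else some w) v = _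
        rw [if_pos h1]
        show decide (x ≤ v) = (decide (x ≤ v) && decide (w ≤ v))
        by_cases hx : x ≤ v <;> by_cases hw : w ≤ v <;> simp [hx, hw] <;> omega
      · show mOK (if x > w then some x else some w) v = _
        rw [if_neg h1]
        show decide (w ≤ v) = (decide (x ≤ v) && decide (w ≤ v))
        by_cases hx : x ≤ v <;> by_cases hw : w ≤ v <;> simp [hx, hw] <;> omega

theorem sumIf_split (P : Int → Bool) (x : Int) (C : List (Int × Int)) :
    sumIf (fun v => decide (x ≤ v) && P v) C =
      (if P x then sumIf (fun v => decide (v = x)) C else 0) +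
        sumIf (fun v => decide (x < v) && P v) C := by
  induction C with
  | nil => simp [sumIf]
  | cons e t ih =>
      obtain ⟨v, f⟩ := e
      simp only [sumIf, ih]
      rcases lt_trichotomy v x with h | h | h
      · have h1 : ¬ x ≤ v := by omega
        have h2 : v ≠ x := by omega
        have h3 : ¬ x < v := by omega
        simp [h1, h2, h3]
        try split <;> ring
      · subst h
        by_cases hP : P v <;> simp [hP, lt_irrefl] <;> try ring
      · have h1 : x ≤ v := by omega
        have h2 : v ≠ x := by omega
        simp [h1, h2, h]
        split <;> ring

theorem countPass_foldl (rp : List Int) :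
    ∀ (m : Option Int) (c h : Int),
      (rp.foldl (countStep h) (c, m)).1 =
        c + sumIf (fun v => mOK m v && decide (v ≤ h)) (canon rp) := by
  induction rp with
  | nil => intro m c h; simp [canon, sumIf]
  | cons x rp ih =>
      intro m c h
      rw [List.foldl_cons]
      rcases hcs : countStep h (c, m) x with ⟨c', m'⟩
      rw [ih, canon_cons, sumIf,
        sumIf_filter (fun v => mOK m v && decide (v ≤ h)) (fun v => decide (x < v))]
      have hm' : m' = mUp m x := by
        have h2 := congrArg Prod.snd hcs; simp only [countStep] at h2; exact h2.symm
      have hsum : sumIf (fun v => mOK m' v && decide (v ≤ h)) (canon rp)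
          = (if (mOK m x && decide (x ≤ h)) = true
              then sumIf (fun v => decide (v = x)) (canon rp) else 0)
            + sumIf (fun v => decide (x < v) && (mOK m v && decide (v ≤ h))) (canon rp) := by
        rw [hm',
          sumIf_ext _ (fun v => decide (x ≤ v) && (mOK m v && decide (v ≤ h))) _
            (fun v => by rw [mOK_mUp, Bool.and_assoc]),
          sumIf_split (fun v => mOK m v && decide (v ≤ h)) x (canon rp)]
      rw [hsum]
      have hc' : c' = c + (if (mOK m x && decide (x ≤ h)) = true then 1 else 0) := by
        have := congrArg Prod.fst hcs
        simp only [countStep] at this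
        by_cases hcond : x ≤ h ∧ mOK m x = true
        · rw [if_pos (by simp [hcond.1, hcond.2])]
          rw [if_pos hcond] at this
          omega
        · rw [if_neg (by simp only [Bool.and_eq_true, decide_eq_true_eq]; tauto)]
          rw [if_neg hcond] at this
          omega
      rw [hc']
      split <;> ring

theorem countPass_canon (rp : List Int) (h : Int) :
    countPass rp h = sumIf (fun v => decide (v ≤ h)) (canon rp) := by
  rw [countPass, countPass_foldl]
  simp only [mOK, Bool.true_and, zero_add]

theorem getD_append_len (done : List Int) (r : Int) (rest : List Int) :
    (done ++ r :: rest).getD done.length 0 = r := by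
  induction done with
  | nil => rfl
  | cons a t ih => simpa [List.getD] using ih

theorem set_append_len (done : List Int) (r v : Int) (rest : List Int) :
    (done ++ r :: rest).set done.length v = done ++ v :: rest := by
  induction done with
  | nil => rfl
  | cons a t ih => simp [List.set, ih]

theorem pyEnum_append (n : Nat) (a b : List Int) :
    pyEnum n (a ++ b) = pyEnum n a ++ pyEnum (n + a.length) b := by
  induction a generalizing n with
  | nil => simp [pyEnum]
  | cons x t ih => simp [pyEnum, ih, Nat.add_assoc, Nat.add_comm 1 t.length]

theorem lefts_length (pre t : List Int) : (lefts pre t).length = t.length := by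
  induction t generalizing pre with
  | nil => rfl
  | cons h t ih => simp [lefts, ih]

theorem rights_length (t suf : List Int) : (rights t suf).length = t.length := by
  induction t generalizing suf with
  | nil => rfl
  | cons h t ih => simp [rights, ih]

theorem rights_append (ps : List Int) (h : Int) (suf : List Int) :
    rights (ps ++ [h]) suf = rights ps (h :: suf) ++ [countPass suf h] := by
  induction ps generalizing suf with
  | nil => simp [rights]
  | cons p t ih => simp [rights, ih]

theorem solveLoop_left (t : List Int) :
    ∀ (done rest pre : List Int), rest.length = t.length →
      solveLoop (pyEnum done.length t) (done ++ rest) (canon pre) =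
        done ++ List.zipWith (· + ·) rest (lefts pre t) := by
  induction t with
  | nil =>
      intro done rest pre hlen
      have : rest = [] := List.eq_nil_of_length_eq_zero hlen
      subst this
      simp [pyEnum, solveLoop, lefts]
  | cons h t ih =>
      intro done rest pre hlen
      rcases rest with _ | ⟨r, rest'⟩
      · simp at hlen
      · rw [pyEnum, solveLoop]
        have hpop := popLoop_eq (canon pre) (canon_pairwise pre) h 0 0
        simp only [hpop, zero_add]
        rw [getD_append_len, set_append_len]
        have hcanon : ((h, sumIf (fun v => decide (v = h)) (canon pre) + 1) ::
            (canon pre).filter (fun p => decide (h < p.1))) = canon (h :: pre) :=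
          (canon_cons h pre).symm
        rw [hcanon]
        have hlen2 : (done ++ [r + sumIf (fun v => decide (v ≤ h)) (canon pre)]).length
            = done.length + 1 := by simp
        have := ih (done ++ [r + sumIf (fun v => decide (v ≤ h)) (canon pre)]) rest' (h :: pre)
          (by simpa using hlen)
        rw [hlen2] at this
        rw [List.append_cons done _ rest', this]
        rw [lefts, List.zipWith_cons_cons, countPass_canon]
        simp

theorem solveLoop_right (pref : List Int) :
    ∀ (suf acc tailDone : List Int), acc.length = pref.length →
      solveLoop ((pyEnum 0 pref).reverse) (acc ++ tailDone) (canon suf) =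
        List.zipWith (· + ·) acc (rights pref suf) ++ tailDone := by
  induction pref using List.reverseRecOn with
  | nil =>
      intro suf acc tailDone hlen
      have : acc = [] := List.eq_nil_of_length_eq_zero hlen
      subst this
      simp [pyEnum, solveLoop, rights]
  | append_singleton ps h ih =>
      intro suf acc tailDone hlen
      have hacc : acc ≠ [] := by
        intro hd; rw [hd] at hlen; simp at hlen
      obtain ⟨ac, a, hdec⟩ : ∃ ac a, acc = ac ++ [a] := ⟨acc.dropLast, acc.getLast hacc, (List.dropLast_append_getLast hacc).symm⟩
      subst hdec
      have hlac : ac.length = ps.length := by simpa using hlen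
      rw [pyEnum_append, List.reverse_append]
      simp only [pyEnum, Nat.zero_add, List.reverse_cons, List.reverse_nil, List.nil_append,
        List.cons_append]
      rw [solveLoop]
      have hpop := popLoop_eq (canon suf) (canon_pairwise suf) h 0 0
      simp only [hpop, zero_add]
      rw [List.append_assoc, List.singleton_append, ← hlac, getD_append_len, set_append_len]
      have hcanon : ((h, sumIf (fun v => decide (v = h)) (canon suf) + 1) ::
          (canon suf).filter (fun p => decide (h < p.1))) = canon (h :: suf) :=
        (canon_cons h suf).symm
      rw [hcanon]
      have := ih (h :: suf) ac ((a + sumIf (fun v => decide (v ≤ h)) (canon suf)) :: tailDone) hlac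
      rw [this, rights_append]
      rw [List.zipWith_append (by rw [hlac, rights_length])]
      simp [countPass_canon]

theorem alt_eq (t : List Int) :
    ∀ (pre hs : List Int), hs = pre ++ t →
      (pyEnum pre.length t).map
          (fun p => countPass ((hs.take p.1).reverse) p.2 + countPass (hs.drop (p.1 + 1)) p.2) =
        List.zipWith (· + ·) (lefts pre.reverse t) (rights t []) := by
  induction t with
  | nil => intro pre hs h; simp [pyEnum, lefts, rights]
  | cons h t ih =>
      intro pre hs hh
      subst hh
      rw [pyEnum, List.map_cons]
      have h1 : ((pre ++ h :: t).take pre.length) = pre := List.take_left' rfl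
      have h2 : ((pre ++ h :: t).drop (pre.length + 1)) = t := by
        have hd : (pre ++ h :: t).drop pre.length = h :: t := List.drop_left' rfl
        calc (pre ++ h :: t).drop (pre.length + 1)
            = ((pre ++ h :: t).drop pre.length).drop 1 := by
              rw [List.drop_drop, Nat.add_comm]
          _ = t := by rw [hd]; rfl
      rw [h1, h2]
      rw [lefts, rights, List.zipWith_cons_cons]
      have h3 := ih (pre ++ [h]) (pre ++ [h] ++ t) (by simp)
      simp only [List.length_append, List.length_cons, List.length_nil, Nat.zero_add,
        List.reverse_append, List.reverse_cons, List.reverse_nil, List.nil_append,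
        List.cons_append, List.append_assoc, List.singleton_append] at h3 ⊢
      rw [h3]
      simp

theorem zipWith_replicate_zero (xs : List Int) :
    List.zipWith (· + ·) (List.replicate xs.length (0 : Int)) xs = xs := by
  induction xs with
  | nil => rfl
  | cons x t ih => simp [List.replicate, ih]

-- ===== VERDICT (by name: the statement is the Claim_ definition above) =====
theorem safe_jumps_spec : Claim_equal_safe_jumps := by
  intro heights _
  unfold Spec_safe_jumps safe_jumps safe_jumps_alt
  have hinner := solveLoop_left heights [] (List.replicate heights.length 0) []
    (by simp)
  simp only [List.length_nil, List.nil_append] at hinner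
  have hzr : List.zipWith (· + ·) (List.replicate heights.length (0 : Int)) (lefts [] heights)
      = lefts [] heights := by
    have hl : heights.length = (lefts [] heights).length := (lefts_length [] heights).symm
    rw [hl]
    exact zipWith_replicate_zero _
  have houter := solveLoop_right heights [] (lefts [] heights) []
    (lefts_length [] heights)
  simp only [List.append_nil] at houter
  have hc0 : canon [] = [] := rfl
  rw [hc0] at hinner houter
  rw [hinner, hzr, houter]
  have halt := alt_eq heights [] heights (by simp)
  simp only [List.length_nil, List.reverse_nil] at halt
  rw [halt]
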